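-- pv_equiv track=rewrite | github.com/bjj0113/Algorithm_coding_test | 프로그래머스/0/181890. 왼쪽 오른쪽/왼쪽 오른쪽.py | solution
-- ===== SOURCE A (Python) =====
-- def solution(str_list):
--     answer = []
--     for i, k in enumerate(str_list):
--         if k == 'l':
--             answer = str_list[:i]
--             break
--         elif k == 'r':
--             answer = str_list[i+1:]
--             break
--
--     return answer
-- ===== SOURCE B (Python) =====
-- def solution(str_list):
--     n = len(str_list)
--     try:
--         il = str_list.index('l')
--     except ValueError:
--         il = n
--     try:
--         ir = str_list.index('r')
--     except ValueError:
--         ir = n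
--     if il < ir:
--         return str_list[:il]
--     if ir < il:
--         return str_list[ir+1:]
--     return []
-- ===== Notes on version B (the rewrite author's own statement) =====
-- stated objective: alternative
-- what changed: Replaces A's single fused enumerate-scan-with-break by a find-both-indices-then-branch decomposition: locate the first 'l' and the first 'r' separately (len as absent sentinel), compare the indices, and slice accordingly.
import Mathlib
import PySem

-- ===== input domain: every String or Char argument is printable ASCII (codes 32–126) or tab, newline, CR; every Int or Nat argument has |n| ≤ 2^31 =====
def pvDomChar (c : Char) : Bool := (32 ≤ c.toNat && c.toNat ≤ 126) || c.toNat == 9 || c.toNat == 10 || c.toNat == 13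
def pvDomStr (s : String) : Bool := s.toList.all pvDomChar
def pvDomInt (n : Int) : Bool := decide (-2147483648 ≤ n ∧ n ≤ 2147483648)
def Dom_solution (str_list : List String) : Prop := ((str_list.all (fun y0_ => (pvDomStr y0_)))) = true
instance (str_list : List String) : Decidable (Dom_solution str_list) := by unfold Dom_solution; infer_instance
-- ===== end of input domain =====

-- B replaces A's fused scan-with-break by finding the first 'l' and first 'r' indices
-- separately and branching on their comparison (alternative decomposition, same cost).

-- ===== PORT A =====
-- the for-loop over enumerate(str_list) with break, counter i, current element k
def solutionGo (full : List String) (rest : List String) (i : Nat) : List String :=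
  match rest with
  | [] => []
  | k :: t =>
    if k = "l" then PySem.List.slice full none (some (i : Int))
    else if k = "r" then PySem.List.slice full (some ((i : Int) + 1)) none
    else solutionGo full t (i + 1)

def solution (str_list : List String) : List String :=
  solutionGo str_list str_list 0

-- ===== PORT B =====
def solution_alt (str_list : List String) : List String :=
  let n := str_list.length
  let il := (PySem.List.index? str_list "l").getD n
  let ir := (PySem.List.index? str_list "r").getD n
  if il < ir then str_list.take il
  else if ir < il then str_list.drop (ir + 1)
  else []

-- ===== PRECONDITION & SPEC =====
def Spec_solution (str_list : List String) (out : List String) : Prop := out = solution_alt str_list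
instance (str_list : List String) (out : List String) : Decidable (Spec_solution str_list out) := by unfold Spec_solution; infer_instance

-- ===== CLAIM (what is proved, stated in full; the proofs are below) =====
def Claim_equal_solution : Prop := ∀ (str_list : List String), Dom_solution str_list → Spec_solution str_list (solution str_list)

-- ===== LEMMAS AND PROOFS =====

-- first index of v in pre ++ v :: t with v ∉ pre
theorem index?_split {α : Type} [BEq α] [LawfulBEq α] (pre t : List α) (v : α)
    (h : v ∉ pre) : PySem.List.index? (pre ++ v :: t) v = some pre.length := by
  rw [PySem.List.index?_eq_some_iff]
  exact ⟨pre, t, rfl, rfl, h⟩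

-- the first 'r' (resp. 'l') lies strictly past position pre.length when it is absent
-- from pre and position pre.length holds the other letter
theorem getD_gt {α : Type} [BEq α] [LawfulBEq α] (pre t : List α) (v w : α)
    (hv : v ∉ pre) (hne : w ≠ v) :
    pre.length < ((PySem.List.index? (pre ++ w :: t) v).getD (pre ++ w :: t).length) := by
  cases hidx : PySem.List.index? (pre ++ w :: t) v with
  | none => simp only [Option.getD_none, List.length_append, List.length_cons]; omega
  | some j =>
    obtain ⟨hk, hget, _⟩ := PySem.List.getElem_of_index?_eq_some hidx
    simp only [Option.getD_some]
    by_contra hle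
    rw [Nat.not_lt] at hle
    rcases Nat.lt_or_eq_of_le hle with hlt | heq
    · apply hv
      have : (pre ++ w :: t)[j] = pre[j]'(hlt) := by
        rw [List.getElem_append_left hlt]
      rw [this] at hget
      rw [← hget]; exact List.getElem_mem hlt
    · apply hne
      have : (pre ++ w :: t)[j] = w := by
        subst heq; simp
      rw [this] at hget; exact hget

theorem go_eq_alt (rest : List String) : ∀ (pre : List String),
    "l" ∉ pre → "r" ∉ pre →
    solutionGo (pre ++ rest) rest pre.length = solution_alt (pre ++ rest) := by
  induction rest with
  | nil =>
    intro pre hl hr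
    simp only [solutionGo, solution_alt, List.append_nil]
    have hL : List.idxOf? "l" pre = none := by
      rw [← PySem.List.index?_eq_idxOf?, PySem.List.index?_eq_none_iff]; exact hl
    have hR : List.idxOf? "r" pre = none := by
      rw [← PySem.List.index?_eq_idxOf?, PySem.List.index?_eq_none_iff]; exact hr
    simp [hL, hR]
  | cons k t ih =>
    intro pre hl hr
    by_cases hkl : k = "l"
    · subst hkl
      simp only [solutionGo]
      have hil : PySem.List.index? (pre ++ "l" :: t) "l" = some pre.length :=
        index?_split pre t "l" hl
      have hir := getD_gt pre t "r" "l" hr (by decide)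
      simp only [solution_alt, hil, Option.getD_some]
      rw [if_pos hir, PySem.List.slice_to_natCast]
      simp
    · by_cases hkr : k = "r"
      · subst hkr
        simp only [solutionGo, if_neg hkl]
        have hir : PySem.List.index? (pre ++ "r" :: t) "r" = some pre.length :=
          index?_split pre t "r" hr
        have hil := getD_gt pre t "l" "r" hl (by decide)
        simp only [solution_alt, hir, Option.getD_some]
        rw [if_neg (Nat.not_lt.mpr (Nat.le_of_lt hil)), if_pos hil]
        have : ((pre.length : Int) + 1) = ((pre.length + 1 : Nat) : Int) := by push_cast; ring
        rw [this, PySem.List.slice_from_natCast]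
        simp
      · simp only [solutionGo, if_neg hkl, if_neg hkr]
        have h1 : pre ++ k :: t = (pre ++ [k]) ++ t := by simp
        have h2 : pre.length + 1 = (pre ++ [k]).length := by simp
        rw [h1, h2]
        exact ih (pre ++ [k]) (by simp [hl]; tauto) (by simp [hr]; tauto)

-- ===== VERDICT (by name: the statement is the Claim_ definition above) =====
theorem solution_spec : Claim_equal_solution := by
  intro str_list _
  unfold Spec_solution solution
  have := go_eq_alt str_list []
  simpa using this (by simp) (by simp)
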